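-- pv_equiv track=rewrite | github.com/thunder1ng/Cyclic-order-analysis-of-chaotic-mapping | n元群最大阶.py | integerBreakForLCM
-- ===== SOURCE A (Python) =====
-- from math import gcd
--
-- def integerBreakForLCM(n: int) -> int:
--     # DP数组建立，注意数组本身容量赋值
--     dp = [1] * (n + 1)
--     # 初始化
--     dp[2] = 1
--
--     for i in range(3, n + 1):
--         # 记录dp[i]最大值
--         result = 0
--         for j in range(1, i):
--             # 计算拆分的两种情况，并取最大值
--             lcm1 = abs(j * (i - j)) // gcd(j, (i - j))
--             lcm2 = abs(j * dp[i - j]) // gcd(j, dp[i - j])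
--             result = max(result, max(lcm1, lcm2))
--         # 最大值存在dp[i]里
--         dp[i] = result
--
--     return dp[n]
-- ===== SOURCE B (Python) =====
-- from math import gcd
--
--
-- def integerBreakForLCM(n: int) -> int:
--     # Top-down memoized recursion on the split point instead of a bottom-up
--     # dp array.  j runs downward so every recursive call below the first is
--     # answered from the memo, keeping the stack depth O(1).
--     memo = {}
--
--     def solve(i):
--         if i < 3:
--             return 1
--         if i in memo:
--             return memo[i]
--         best = 0
--         for j in range(i - 1, 0, -1):
--             lcm1 = abs(j * (i - j)) // gcd(j, i - j)
--             s = solve(i - j)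
--             lcm2 = abs(j * s) // gcd(j, s)
--             best = max(best, max(lcm1, lcm2))
--         memo[i] = best
--         return best
--
--     return solve(n)
-- ===== Notes on version B (the rewrite author's own statement) =====
-- stated objective: alternative
-- what changed: Replaced the bottom-up dp-array loop by a top-down memoized recursion on the split point (iterative array fill -> recursive decomposition with a memo dict), iterating split points downward so the recursion depth stays O(1).
import Mathlib
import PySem

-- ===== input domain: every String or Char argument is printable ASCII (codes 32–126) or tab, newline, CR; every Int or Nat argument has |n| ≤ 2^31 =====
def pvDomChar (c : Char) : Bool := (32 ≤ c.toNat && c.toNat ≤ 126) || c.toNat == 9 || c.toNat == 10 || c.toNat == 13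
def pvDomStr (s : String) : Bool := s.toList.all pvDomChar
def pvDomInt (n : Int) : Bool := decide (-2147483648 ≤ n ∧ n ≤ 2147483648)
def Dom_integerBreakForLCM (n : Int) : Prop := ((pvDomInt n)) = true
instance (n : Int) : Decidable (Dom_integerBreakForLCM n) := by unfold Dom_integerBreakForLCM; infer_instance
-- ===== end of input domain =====

-- B replaces A's bottom-up dp array by top-down memoized recursion on the split point (alternative decomposition, same asymptotic cost).

-- shared arithmetic helpers: abs(x*y) // gcd(x, y)  (math.gcd = Int.gcd, // = floordiv)
def pvLcm1 (i j : Int) : Int := PySem.Int.floordiv |j * (i - j)| (Int.gcd j (i - j) : Int)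
def pvLcm2 (j s : Int) : Int := PySem.Int.floordiv |j * s| (Int.gcd j s : Int)

-- ===== PORT A =====
-- dp = [1]*(n+1); dp[2] = 1; bottom-up fill.  pySetD/pyGetD defaults never fire under Pre_ (all indices in range).
def integerBreakForLCM (n : Int) : Int :=
  let dp : List Int := PySem.List.pyRepeat [1] (n + 1)
  let dp := PySem.List.pySetD dp 2 1
  let dp := (PySem.List.pyRange 3 (n + 1) 1).foldl (fun dp i =>
      let result := (PySem.List.pyRange 1 i 1).foldl (fun result j =>
          max result (max (pvLcm1 i j) (pvLcm2 j (PySem.List.pyGetD dp (i - j) 0)))) 0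
      PySem.List.pySetD dp i result) dp
  PySem.List.pyGetD dp n 0

-- ===== PORT B =====
-- memoized top-down recursion; memo mirrors the Python dict; the `h : j < i` argument only justifies termination.
mutual
def pvSolveLoop (memo : PySem.Dict Nat Int) (i j : Nat) (best : Int) (h : j < i) : Int × PySem.Dict Nat Int :=
  if hj : j = 0 then (best, memo)
  else
    let lcm1 := pvLcm1 (i : Int) (j : Int)
    let p := pvSolve memo (i - j)
    let lcm2 := pvLcm2 (j : Int) p.1
    pvSolveLoop p.2 i (j - 1) (max best (max lcm1 lcm2)) (by omega)
termination_by (i, j)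
decreasing_by
  · show Prod.Lex _ _ _ _
    rcases Nat.lt_or_ge (i - j + 1) i with hlt | hge
    · exact Prod.Lex.left _ _ hlt
    · have he : i - j + 1 = i := by omega
      rw [he]
      exact Prod.Lex.right _ (by omega)
  · exact Prod.Lex.right _ (by omega)

def pvSolve (memo : PySem.Dict Nat Int) (i : Nat) : Int × PySem.Dict Nat Int :=
  if h3 : i < 3 then (1, memo)
  else
    match memo.get? i with
    | some v => (v, memo)
    | none =>
      let p := pvSolveLoop memo i (i - 1) 0 (by omega)
      (p.1, p.2.insert i p.1)
termination_by (i + 1, 0)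
decreasing_by
  exact Prod.Lex.left _ _ (by omega)
end

def integerBreakForLCM_alt (n : Int) : Int :=
  (pvSolve PySem.Dict.empty n.toNat).1

-- ===== PRECONDITION & SPEC =====
-- Pre_ excludes exactly n < 2, where A raises IndexError on `dp[2] = 1`.
def Pre_integerBreakForLCM (n : Int) : Prop := 2 ≤ n
instance (n : Int) : Decidable (Pre_integerBreakForLCM n) := by unfold Pre_integerBreakForLCM; infer_instance
def pvWitness_integerBreakForLCM : Int := 5

def Spec_integerBreakForLCM (n : Int) (out : Int) : Prop := out = integerBreakForLCM_alt n
instance (n : Int) (out : Int) : Decidable (Spec_integerBreakForLCM n out) := by unfold Spec_integerBreakForLCM; infer_instance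

-- ===== CLAIM (what is proved, stated in full; the proofs are below) =====
def Claim_equal_integerBreakForLCM : Prop := ∀ (n : Int), Dom_integerBreakForLCM n → Pre_integerBreakForLCM n → Spec_integerBreakForLCM n (integerBreakForLCM n)

-- ===== LEMMAS AND PROOFS =====

-- pure value of the recursion (proof helper; same shape as port B, no memo)
mutual
def pvGLoop (i j : Nat) (best : Int) (h : j < i) : Int :=
  if hj : j = 0 then best
  else pvGLoop i (j - 1) (max best (max (pvLcm1 (i : Int) (j : Int)) (pvLcm2 (j : Int) (pvG (i - j))))) (by omega)
termination_by (i, j)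
decreasing_by
  · show Prod.Lex _ _ _ _
    rcases Nat.lt_or_ge (i - j + 1) i with hlt | hge
    · exact Prod.Lex.left _ _ hlt
    · have he : i - j + 1 = i := by omega
      rw [he]
      exact Prod.Lex.right _ (by omega)
  · exact Prod.Lex.right _ (by omega)

def pvG (i : Nat) : Int :=
  if h3 : i < 3 then 1 else pvGLoop i (i - 1) 0 (by omega)
termination_by (i + 1, 0)
decreasing_by
  exact Prod.Lex.left _ _ (by omega)
end

-- one max-term of the inner loop, at split point jj
def pvT (i jj : Nat) : Int := max (pvLcm1 (i : Int) (jj : Int)) (pvLcm2 (jj : Int) (pvG (i - jj)))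

theorem pv_foldl_max_out (t : Nat → Int) (l : List Nat) (b y : Int) :
    l.foldl (fun b k => max b (t k)) (max b y) = max (l.foldl (fun b k => max b (t k)) b) y := by
  induction l generalizing b with
  | nil => rfl
  | cons a l ih => simp only [List.foldl_cons, max_right_comm b y (t a)]; exact ih _

-- the descending loop equals the ascending fold over split points 1..j
theorem pvGLoop_eq_foldl (i : Nat) : ∀ (j : Nat) (h : j < i) (best : Int),
    pvGLoop i j best h = (List.range j).foldl (fun b k => max b (pvT i (k + 1))) best := by
  intro j
  induction j with
  | zero => intro h best; unfold pvGLoop; simp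
  | succ j ih =>
    intro h best
    unfold pvGLoop
    simp only [Nat.succ_ne_zero, dite_false, Nat.add_sub_cancel]
    rw [ih (by omega), List.range_succ, List.foldl_append]
    simp only [List.foldl_cons, List.foldl_nil]
    rw [← pv_foldl_max_out]
    rfl

theorem pvG_eq_foldl (i : Nat) (h3 : 3 ≤ i) :
    pvG i = (List.range (i - 1)).foldl (fun b k => max b (pvT i (k + 1))) 0 := by
  rw [pvG, dif_neg (by omega : ¬ i < 3)]
  exact pvGLoop_eq_foldl i (i - 1) (by omega) 0

-- the memo only ever stores correct values
def pvGood (memo : PySem.Dict Nat Int) : Prop := ∀ k v, memo.get? k = some v → v = pvG k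

theorem pvG_small (k : Nat) (hk : k < 3) : pvG k = 1 := by
  rw [pvG, dif_pos hk]

theorem pvSolveLoop_ok (i : Nat)
    (IH : ∀ m, m < i → ∀ memo, pvGood memo → (pvSolve memo m).1 = pvG m ∧ pvGood (pvSolve memo m).2) :
    ∀ (j : Nat) (h : j < i) (best : Int) (memo : PySem.Dict Nat Int), pvGood memo →
      (pvSolveLoop memo i j best h).1 = pvGLoop i j best h ∧ pvGood (pvSolveLoop memo i j best h).2 := by
  intro j
  induction j with
  | zero =>
    intro h best memo hg
    unfold pvSolveLoop pvGLoop
    simpa using hg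
  | succ j ihj =>
    intro h best memo hg
    obtain ⟨h1, h2⟩ := IH (i - (j + 1)) (by omega) memo hg
    unfold pvSolveLoop pvGLoop
    simp only [Nat.succ_ne_zero, dite_false, Nat.add_sub_cancel, h1]
    exact ihj (by omega) _ _ h2

theorem pvSolve_ok : ∀ (i : Nat) (memo : PySem.Dict Nat Int), pvGood memo →
    (pvSolve memo i).1 = pvG i ∧ pvGood (pvSolve memo i).2 := by
  intro i
  induction i using Nat.strong_induction_on with
  | _ i IH =>
    intro memo hg
    by_cases h3 : i < 3
    · unfold pvSolve
      simp only [h3, dite_true]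
      exact ⟨(pvG_small i h3).symm, hg⟩
    · have hgi : pvG i = pvGLoop i (i - 1) 0 (by omega) := by rw [pvG, dif_neg h3]
      unfold pvSolve
      simp only [h3, dite_false]
      cases hm : memo.get? i with
      | some v =>
        simp only []
        exact ⟨hg i v hm, hg⟩
      | none =>
        simp only []
        obtain ⟨hl1, hl2⟩ := pvSolveLoop_ok i IH (i - 1) (by omega) 0 memo hg
        refine ⟨by rw [hl1, hgi], ?_⟩
        intro k v hkv
        rw [PySem.Dict.get?_insert] at hkv
        by_cases hk : k = i
        · rw [if_pos hk] at hkv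
          cases hkv
          subst hk
          rw [hl1]
          exact hgi.symm
        · rw [if_neg hk] at hkv
          exact hl2 k v hkv

theorem pv_alt_eq_pvG (n : Int) : integerBreakForLCM_alt n = pvG n.toNat := by
  have h := pvSolve_ok n.toNat PySem.Dict.empty (by intro k v hv; simp [PySem.Dict.get?_empty] at hv)
  unfold integerBreakForLCM_alt
  exact h.1

-- A-side proof helpers: the outer-loop body and the inner loop, named
def pvInner (dp : List Int) (i : Int) : Int :=
  (PySem.List.pyRange 1 i 1).foldl (fun result j =>
    max result (max (pvLcm1 i j) (pvLcm2 j (PySem.List.pyGetD dp (i - j) 0)))) 0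

def pvBody (dp : List Int) (i : Int) : List Int :=
  PySem.List.pySetD dp i (pvInner dp i)

-- invariant after the outer loop has processed 3,…,m-1
def pvInv (N : Nat) (m : Int) (dp : List Int) : Prop :=
  dp.length = N ∧ ∀ k : Nat, k < N → (k : Int) < m → dp.getD k 0 = pvG k

theorem pv_a_unfold (n : Int) :
    integerBreakForLCM n = PySem.List.pyGetD
      ((PySem.List.pyRange 3 (n + 1) 1).foldl pvBody
        (PySem.List.pySetD (PySem.List.pyRepeat [1] (n + 1)) 2 1)) n 0 := rfl

theorem pvInner_eq (N : Nat) (dp : List Int) (b : Int) (hb : 3 ≤ b) (hbN : b < (N : Int))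
    (hinv : pvInv N b dp) : pvInner dp b = pvG b.toNat := by
  obtain ⟨hlen, hval⟩ := hinv
  unfold pvInner
  rw [PySem.List.foldl_congr_mem (PySem.List.pyRange 1 b)
    (fun result j => max result (max (pvLcm1 b j) (pvLcm2 j (PySem.List.pyGetD dp (b - j) 0))))
    (fun result j => max result (max (pvLcm1 b j) (pvLcm2 j (pvG (b - j).toNat)))) 0
    (by
      intro acc j hj
      rw [PySem.List.mem_pyRange_one] at hj
      have h0 : PySem.List.pyGetD dp (b - j) 0 = pvG (b - j).toNat := by
        rw [PySem.List.pyGetD_of_nonneg dp 0 (by omega)]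
        exact hval (b - j).toNat (by omega) (by omega)
      simp only [h0])]
  rw [PySem.List.pyRange_one, List.foldl_map]
  have hfn : (fun (result : Int) (k : Nat) =>
        max result (max (pvLcm1 b (1 + (k : Int))) (pvLcm2 (1 + (k : Int)) (pvG (b - (1 + (k : Int))).toNat))))
      = fun (b' : Int) (k : Nat) => max b' (pvT b.toNat (k + 1)) := by
    funext r k
    unfold pvT
    have e1 : (1 + (k : Int)) = ((k + 1 : Nat) : Int) := by push_cast; ring
    have e3 : (b - (1 + (k : Int))).toNat = b.toNat - (k + 1) := by omega
    have e2 : pvLcm1 b ((k + 1 : Nat) : Int) = pvLcm1 ((b.toNat : Nat) : Int) ((k + 1 : Nat) : Int) := by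
      rw [show ((b.toNat : Nat) : Int) = b by omega]
    rw [e3, e1, e2]
  rw [hfn]
  have hcnt : (b - 1).toNat = b.toNat - 1 := by omega
  rw [hcnt, ← pvG_eq_foldl b.toNat (by omega)]

theorem pvBody_inv (N : Nat) (dp : List Int) (b : Int) (hb : 3 ≤ b) (hbN : b < (N : Int))
    (hinv : pvInv N b dp) : pvInv N (b + 1) (pvBody dp b) := by
  have hres := pvInner_eq N dp b hb hbN hinv
  obtain ⟨hlen, hval⟩ := hinv
  unfold pvBody
  rw [PySem.List.pySetD_of_nonneg dp (pvInner dp b) (by omega : (0:Int) ≤ b)]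
  constructor
  · rw [List.length_set]; exact hlen
  · intro k hk hkm
    by_cases hkb : k = b.toNat
    · subst hkb
      have hplen : b.toNat < dp.length := by omega
      simp only [List.getD, List.getElem?_set_self, hplen, Option.getD_some]
      exact hres
    · have hne : (dp.set b.toNat (pvInner dp b)).getD k 0 = dp.getD k 0 := by
        simp [List.getD, (Ne.symm hkb : b.toNat ≠ k)]
      rw [hne]
      exact hval k hk (by omega)

theorem pv_outer_inv (n : Int) (hn : 2 ≤ n) : ∀ (d : Nat), 3 + (d : Int) ≤ n + 1 →
    pvInv (n + 1).toNat (3 + (d : Int))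
      ((PySem.List.pyRange 3 (3 + (d : Int)) 1).foldl pvBody
        (PySem.List.pySetD (PySem.List.pyRepeat [1] (n + 1)) 2 1)) := by
  intro d
  induction d with
  | zero =>
    intro _
    rw [show ((0 : Nat) : Int) = 0 by rfl, add_zero,
      PySem.List.pyRange_one_eq_nil (le_refl 3), List.foldl_nil]
    rw [PySem.List.pyRepeat_singleton, PySem.List.pySetD_of_nonneg _ _ (by omega : (0:Int) ≤ 2)]
    constructor
    · rw [List.length_set, List.length_replicate]
    · intro k hk hkm
      have h1 : ((List.replicate (n + 1).toNat (1 : Int)).set (Int.toNat 2) 1).getD k 0 = 1 := by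
        by_cases hk2 : k = Int.toNat 2
        · subst hk2
          have hplen : Int.toNat 2 < (List.replicate (n + 1).toNat (1 : Int)).length := by
            rw [List.length_replicate]; omega
          have h2n : 2 < (n + 1).toNat := by omega
          simp [List.getD, h2n]
        · have h2 : ((List.replicate (n + 1).toNat (1 : Int)).set (Int.toNat 2) 1).getD k 0
              = (List.replicate (n + 1).toNat (1 : Int)).getD k 0 := by
            simp [List.getD]
          rw [h2]
          simp [List.getD, hk]
      rw [h1, pvG_small k (by omega)]
  | succ d ihd =>
    intro hle
    have h3d : (3 : Int) ≤ 3 + (d : Int) := by omega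
    rw [show ((d + 1 : Nat) : Int) = (d : Int) + 1 by push_cast; ring, ← add_assoc,
      PySem.List.pyRange_one_succ_right h3d, List.foldl_append, List.foldl_cons, List.foldl_nil]
    exact pvBody_inv _ _ _ h3d (by omega) (ihd (by omega))

theorem pv_a_eq_pvG (n : Int) (hn : 2 ≤ n) : integerBreakForLCM n = pvG n.toNat := by
  rw [pv_a_unfold]
  have hfin := pv_outer_inv n hn (n - 2).toNat (by omega)
  rw [show 3 + ((n - 2).toNat : Int) = n + 1 by omega] at hfin
  obtain ⟨hlen, hval⟩ := hfin
  rw [PySem.List.pyGetD_of_nonneg _ _ (by omega : (0:Int) ≤ n)]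
  exact hval n.toNat (by omega) (by omega)

-- ===== VERDICT (by name: the statement is the Claim_ definition above) =====
theorem integerBreakForLCM_spec : Claim_equal_integerBreakForLCM := by
  intro n _ hpre
  unfold Spec_integerBreakForLCM
  rw [pv_a_eq_pvG n hpre, pv_alt_eq_pvG n]
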